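-- pv_equiv track=rewrite | github.com/aajarven/adventofcode2022 | day08/src/treehouse.py | visible_from_right
-- ===== SOURCE A (Python) =====
-- def visible_from_right(tree_heights):
--     """
--     Return an array showing whether a tree is visible from the right edge
--     """
--     visible = []
--     for row in tree_heights:
--         visible_on_row = []
--         highest_on_row = -1
--         for tree in row[::-1]:
--             if tree > highest_on_row:
--                 visible_on_row.insert(0, True)
--                 highest_on_row = tree
--             else:
--                 visible_on_row.insert(0, False)
--         visible.append(visible_on_row)
--     return visible
-- ===== SOURCE B (Python) =====
-- def visible_from_right(tree_heights):
--     """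
--     Return an array showing whether a tree is visible from the right edge
--     """
--     return [
--         [height > max([-1] + row[i + 1:]) for i, height in enumerate(row)]
--         for row in tree_heights
--     ]
-- ===== Notes on version B (the rewrite author's own statement) =====
-- stated objective: simpler
-- what changed: Replaces A's reversed-iteration running-maximum loop with front insertions by a per-index comprehension comparing each tree against the max of its right suffix (floored at -1).
import Mathlib
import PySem

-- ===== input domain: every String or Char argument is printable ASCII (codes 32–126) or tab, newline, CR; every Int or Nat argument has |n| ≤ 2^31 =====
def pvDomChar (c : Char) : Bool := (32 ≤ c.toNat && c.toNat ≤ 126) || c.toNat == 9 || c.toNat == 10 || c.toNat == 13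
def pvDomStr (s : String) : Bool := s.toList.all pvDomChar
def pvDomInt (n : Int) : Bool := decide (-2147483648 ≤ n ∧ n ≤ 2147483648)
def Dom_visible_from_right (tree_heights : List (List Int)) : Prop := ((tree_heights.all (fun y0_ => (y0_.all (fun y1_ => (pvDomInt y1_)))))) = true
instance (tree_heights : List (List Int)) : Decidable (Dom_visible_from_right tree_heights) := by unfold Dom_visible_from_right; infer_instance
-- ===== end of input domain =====

-- B changes the algorithm: per-index comparison against the suffix maximum (floored at -1)
-- instead of A's reversed running-maximum loop with front insertions; objective: simpler.

-- ===== PORT A =====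
-- inner loop body: if tree > highest: insert(0, True); highest = tree  else insert(0, False)
-- (visible_on_row.insert(0, x) at position 0 is cons: PySem.List.insert_zero)
def stepA (st : List Bool × Int) (tree : Int) : List Bool × Int :=
  if tree > st.2 then (true :: st.1, tree) else (false :: st.1, st.2)

-- one row: iterate over row[::-1] (= row.reverse, PySem.List.slice?_none_none_neg_one)
def rowA (row : List Int) : List Bool :=
  (row.reverse.foldl stepA (([] : List Bool), (-1 : Int))).1

def visible_from_right (tree_heights : List (List Int)) : List (List Bool) :=
  tree_heights.foldl (fun visible row => visible ++ [rowA row]) []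

-- ===== PORT B =====
-- max([-1] + suffix): Python max of the nonempty list (-1)::suffix is the running-max loop
-- (PySem.List.max?_id_cons), i.e. suffix.foldl max (-1)
def rowB (row : List Int) : List Bool :=
  (PySem.List.enumerate row 0).map (fun p =>
    decide (p.2 > (PySem.List.slice row (some (p.1 + 1)) none).foldl max (-1)))

def visible_from_right_alt (tree_heights : List (List Int)) : List (List Bool) :=
  tree_heights.map rowB

-- ===== PRECONDITION & SPEC =====
def Spec_visible_from_right (tree_heights : List (List Int)) (out : List (List Bool)) : Prop := out = visible_from_right_alt tree_heights
instance (tree_heights : List (List Int)) (out : List (List Bool)) : Decidable (Spec_visible_from_right tree_heights out) := by unfold Spec_visible_from_right; infer_instance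

-- ===== CLAIM (what is proved, stated in full; the proofs are below) =====
def Claim_equal_visible_from_right : Prop := ∀ (tree_heights : List (List Int)), Dom_visible_from_right tree_heights → Spec_visible_from_right tree_heights (visible_from_right tree_heights)

-- ===== LEMMAS AND PROOFS =====

theorem foldl_max_shift (t : List Int) (a : Int) : ∀ b, t.foldl max (max a b) = max a (t.foldl max b) := by
  induction t with
  | nil => intro b; simp
  | cons h t ih =>
      intro b
      simpa [List.foldl_cons, max_assoc] using ih (max b h)

theorem enumerate_shift {α : Type} (t : List α) : ∀ s : Int,
    PySem.List.enumerate t (s + 1) = (PySem.List.enumerate t s).map (fun p => (p.1 + 1, p.2)) := by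
  induction t with
  | nil => intro s; simp [PySem.List.enumerate_nil]
  | cons h t ih =>
      intro s
      simp [PySem.List.enumerate_cons, ih (s + 1)]

theorem rowB_cons (h : Int) (t : List Int) :
    rowB (h :: t) = decide (h > t.foldl max (-1)) :: rowB t := by
  unfold rowB
  rw [PySem.List.enumerate_cons, List.map_cons]
  congr 1
  · simp [PySem.List.slice_from_one]
  · rw [show (0 : Int) + 1 = 0 + 1 from rfl, enumerate_shift t 0, List.map_map]
    apply List.map_congr_left
    intro p hp
    rcases (PySem.List.mem_enumerate_iff _ _ _).1 hp with ⟨k, hk, rfl⟩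
    simp only [Function.comp]
    have h1 : ((0 : Int) + k) + 1 + 1 = ((k + 2 : Nat) : Int) := by push_cast; ring
    have h2 : ((0 : Int) + k) + 1 = ((k + 1 : Nat) : Int) := by push_cast; ring
    rw [h1, h2, PySem.List.slice_from_natCast, PySem.List.slice_from_natCast,
        List.drop_succ_cons]

theorem pairA (row : List Int) :
    row.foldr (fun x st => stepA st x) (([] : List Bool), (-1 : Int))
      = (rowB row, row.foldl max (-1)) := by
  induction row with
  | nil => simp [rowB, PySem.List.enumerate_nil]
  | cons h t ih =>
      rw [List.foldr_cons, ih, rowB_cons]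
      unfold stepA
      have hmax : (h :: t).foldl max (-1) = max h (t.foldl max (-1)) := by
        rw [List.foldl_cons, show max (-1 : Int) h = max h (-1) from max_comm _ _,
            foldl_max_shift]
      by_cases hc : h > t.foldl max (-1)
      · simp only [hc, if_pos, hmax]
        have : max h (t.foldl max (-1)) = h := max_eq_left (le_of_lt hc)
        simp [this]
      · simp only [hc, if_neg, hmax, not_false_eq_true]
        have : max h (t.foldl max (-1)) = t.foldl max (-1) := max_eq_right (by omega)
        simp [this]

theorem rowA_eq_rowB (row : List Int) : rowA row = rowB row := by
  unfold rowA
  rw [List.foldl_reverse]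
  have := pairA row
  simp only [this]

theorem foldl_append_map {α β : Type} (f : α → β) (l : List α) : ∀ acc : List β,
    l.foldl (fun v r => v ++ [f r]) acc = acc ++ l.map f := by
  induction l with
  | nil => intro acc; simp
  | cons h t ih => intro acc; simp [List.foldl_cons, ih]

-- ===== VERDICT (by name: the statement is the Claim_ definition above) =====
theorem visible_from_right_spec : Claim_equal_visible_from_right := by
  intro ths _
  unfold Spec_visible_from_right visible_from_right visible_from_right_alt
  rw [foldl_append_map rowA ths]
  simp [rowA_eq_rowB]
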